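-- pv_equiv track=rewrite | github.com/reylee2/Study-by-myself | python/project1_mark/block_content.py | blocks
-- ===== SOURCE A (Python) =====
-- def lines(file):
--     for f in file:
--         yield f
--     yield ''
--
-- def blocks(file):
--     block=[]
--     for l in lines(file):
--         if l.strip():
--             block.append(l)
--         elif block:
--             yield ''.join(block).strip()
--             block=[]
-- ===== SOURCE B (Python) =====
-- def blocks(file):
--     data = list(file)
--     n = len(data)
--     i = 0
--     while i < n:
--         if data[i].strip():
--             j = i + 1
--             while j < n and data[j].strip():
--                 j += 1
--             yield ''.join(data[i:j]).strip()
--             i = j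
--         else:
--             i += 1
-- ===== Notes on version B (the rewrite author's own statement) =====
-- stated objective: alternative
-- what changed: Replaces the sentinel-generator plus mutable block accumulator with a two-pointer scan over the indexed list: each run of nonblank lines is located by an inner index scan and joined by one slice, so no accumulator list and no end-of-input sentinel are needed.
import Mathlib
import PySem

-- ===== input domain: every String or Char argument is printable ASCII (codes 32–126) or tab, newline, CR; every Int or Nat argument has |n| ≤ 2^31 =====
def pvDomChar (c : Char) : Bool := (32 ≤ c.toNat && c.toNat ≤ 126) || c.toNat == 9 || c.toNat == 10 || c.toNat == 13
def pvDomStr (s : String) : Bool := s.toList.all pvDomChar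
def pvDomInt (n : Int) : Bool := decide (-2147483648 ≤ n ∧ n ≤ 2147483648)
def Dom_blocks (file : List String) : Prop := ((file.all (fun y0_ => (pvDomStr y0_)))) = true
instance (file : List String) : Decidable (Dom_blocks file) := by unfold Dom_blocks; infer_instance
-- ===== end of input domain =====

-- B replaces A's sentinel generator + mutable accumulator with a two-pointer index
-- scan that joins each nonblank run by one slice (objective: alternative decomposition).

-- ===== PORT A =====
-- A iterates over `lines(file)` = file ++ [''] with a `block` accumulator,
-- appending nonblank lines and emitting the joined, stripped block at each blank.
def blocksGoA : List String → List String → List String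
  | [], _ => []
  | l :: ls, block =>
    if PySem.Str.strip l ≠ "" then
      blocksGoA ls (block ++ [l])
    else if block ≠ [] then
      PySem.Str.strip (PySem.Str.join "" block) :: blocksGoA ls []
    else
      blocksGoA ls block

def blocks (file : List String) : List String :=
  blocksGoA (file ++ [""]) []

-- ===== PORT B =====
-- inner `while j < n and data[j].strip(): j += 1`
def blocksScanB (data : List String) (n : Nat) (j : Nat) : Nat :=
  if j < n then
    if PySem.Str.strip (data.getD j "") ≠ "" then blocksScanB data n (j + 1) else j
  else j
termination_by n - j

theorem blocksScanB_ge (data : List String) (n j : Nat) : j ≤ blocksScanB data n j := by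
  unfold blocksScanB
  split
  · split
    · exact le_trans (Nat.le_succ j) (blocksScanB_ge data n (j + 1))
    · exact le_refl j
  · exact le_refl j
termination_by n - j

-- outer `while i < n:` loop
def blocksLoopB (data : List String) (n : Nat) (i : Nat) : List String :=
  if h : i < n then
    if PySem.Str.strip (data.getD i "") ≠ "" then
      let j := blocksScanB data n (i + 1)
      PySem.Str.strip (PySem.Str.join "" (PySem.List.slice data (some (i : Int)) (some (j : Int))))
        :: blocksLoopB data n j
    else
      blocksLoopB data n (i + 1)
  else []
termination_by n - i
decreasing_by
  · have := blocksScanB_ge data n (i + 1); omega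
  · omega

def blocks_alt (file : List String) : List String :=
  blocksLoopB file file.length 0

-- ===== PRECONDITION & SPEC =====
def Spec_blocks (file : List String) (out : List String) : Prop := out = blocks_alt file
instance (file : List String) (out : List String) : Decidable (Spec_blocks file out) := by unfold Spec_blocks; infer_instance

-- ===== CLAIM (what is proved, stated in full; the proofs are below) =====
def Claim_equal_blocks : Prop := ∀ (file : List String), Dom_blocks file → Spec_blocks file (blocks file)

-- ===== LEMMAS AND PROOFS =====

-- blank-line predicate shared by the characterisation
def nbP (l : String) : Bool := PySem.Str.strip l ≠ ""

-- common characterisation: the stripped joins of the maximal nonblank runs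
def specBlocks : List String → List String
  | [] => []
  | l :: ls =>
    if nbP l then
      PySem.Str.strip (PySem.Str.join "" (l :: ls.takeWhile nbP))
        :: specBlocks (ls.dropWhile nbP)
    else specBlocks ls
termination_by ls => ls.length
decreasing_by
  · have h1 : (ls.dropWhile nbP).length ≤ ls.length := List.length_dropWhile_le nbP ls
    simpa using Nat.lt_succ_of_le h1
  · simp

theorem specBlocks_cons_pos (l : String) (ls : List String) (h : nbP l = true) :
    specBlocks (l :: ls) =
      PySem.Str.strip (PySem.Str.join "" (l :: ls.takeWhile nbP))
        :: specBlocks (ls.dropWhile nbP) := by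
  rw [specBlocks, if_pos h]

theorem specBlocks_cons_neg (l : String) (ls : List String) (h : nbP l = false) :
    specBlocks (l :: ls) = specBlocks ls := by
  rw [specBlocks, if_neg (by simp [h])]

theorem take_len_takeWhile (p : String → Bool) (l : List String) :
    l.take (l.takeWhile p).length = l.takeWhile p := by
  rw [show l.take (l.takeWhile p).length
        = (l.takeWhile p ++ l.dropWhile p).take (l.takeWhile p).length from by
        rw [List.takeWhile_append_dropWhile],
      List.take_left' rfl]

theorem dropWhile_eq_drop_len (p : String → Bool) (l : List String) :
    l.dropWhile p = l.drop (l.takeWhile p).length := by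
  rw [show l.drop (l.takeWhile p).length
        = (l.takeWhile p ++ l.dropWhile p).drop (l.takeWhile p).length from by
        rw [List.takeWhile_append_dropWhile],
      List.drop_left' rfl]

theorem goA_eq_spec (ls : List String) : ∀ block, blocksGoA (ls ++ [""]) block =
    if block = [] then specBlocks ls
    else PySem.Str.strip (PySem.Str.join "" (block ++ ls.takeWhile nbP))
          :: specBlocks (ls.dropWhile nbP) := by
  induction ls with
  | nil =>
    intro block
    simp only [List.nil_append, blocksGoA, List.takeWhile_nil, List.dropWhile_nil, specBlocks]
    rw [if_neg (by decide)]
    by_cases hb : block = []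
    · rw [if_neg (by simp [hb]), if_pos hb]
    · rw [if_pos hb, if_neg hb, List.append_nil]
  | cons l ls ih =>
    intro block
    simp only [List.cons_append, blocksGoA]
    by_cases hl : PySem.Str.strip l = ""
    · have hnb : nbP l = false := by simp [nbP, hl]
      rw [if_neg (by simpa using hl)]
      by_cases hb : block = []
      · rw [if_neg (by simp [hb]), ih]
        simp [hb, specBlocks_cons_neg l ls hnb]
      · rw [if_pos hb, ih, if_pos rfl, if_neg hb]
        rw [List.takeWhile_cons_of_neg (by simp [hnb]), List.dropWhile_cons_of_neg (by simp [hnb])]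
        rw [List.append_nil, specBlocks_cons_neg l ls hnb]
    · have hnb : nbP l = true := by simp [nbP, hl]
      rw [if_pos hl, ih, if_neg (by simp)]
      rw [List.takeWhile_cons_of_pos (by simp [hnb]), List.dropWhile_cons_of_pos (by simp [hnb])]
      by_cases hb : block = []
      · rw [if_pos hb, hb, specBlocks_cons_pos l ls hnb]; simp
      · rw [if_neg hb]; simp

theorem blocksScanB_drop (data : List String) (j : Nat) :
    blocksScanB data data.length j = j + ((data.drop j).takeWhile nbP).length := by
  unfold blocksScanB
  by_cases h : j < data.length
  · rw [if_pos h]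
    have hget : data.getD j "" = data[j]'h := by
      simp [List.getD, List.getElem?_eq_getElem h]
    have hdrop : data.drop j = data[j]'h :: data.drop (j + 1) :=
      List.drop_eq_getElem_cons h
    by_cases hs : PySem.Str.strip (data.getD j "") ≠ ""
    · rw [if_pos hs, blocksScanB_drop data (j + 1)]
      have hnb : nbP (data[j]'h) = true := by
        have hx : PySem.Str.strip (data[j]'h) ≠ "" := by rw [← hget]; exact hs
        simp [nbP, hx]
      rw [hdrop, List.takeWhile_cons_of_pos (by simp [hnb])]
      simp; omega
    · rw [if_neg hs]
      have hnb : nbP (data[j]'h) = false := by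
        have hx : PySem.Str.strip (data[j]'h) = "" := by rw [← hget]; simpa using hs
        simp [nbP, hx]
      rw [hdrop, List.takeWhile_cons_of_neg (by simp [hnb])]
      simp
  · rw [if_neg h]
    have hd : data.drop j = [] := List.drop_eq_nil_of_le (by omega)
    simp [hd]
termination_by data.length - j

theorem blocksLoopB_eq_spec (data : List String) (i : Nat) :
    blocksLoopB data data.length i = specBlocks (data.drop i) := by
  unfold blocksLoopB
  by_cases h : i < data.length
  · rw [dif_pos h]
    have hget : data.getD i "" = data[i]'h := by
      simp [List.getD, List.getElem?_eq_getElem h]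
    have hdrop : data.drop i = data[i]'h :: data.drop (i + 1) :=
      List.drop_eq_getElem_cons h
    by_cases hs : PySem.Str.strip (data.getD i "") ≠ ""
    · rw [if_pos hs]
      have hnb : nbP (data[i]'h) = true := by
        have hx : PySem.Str.strip (data[i]'h) ≠ "" := by rw [← hget]; exact hs
        simp [nbP, hx]
      show PySem.Str.strip (PySem.Str.join "" (PySem.List.slice data
              (some (i : Int)) (some ((blocksScanB data data.length (i + 1) : Nat) : Int))))
          :: blocksLoopB data data.length (blocksScanB data data.length (i + 1))
        = specBlocks (data.drop i)
      have hscan := blocksScanB_drop data (i + 1)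
      set t := ((data.drop (i + 1)).takeWhile nbP).length with htdef
      set j := blocksScanB data data.length (i + 1) with hjdef
      have hslice : PySem.List.slice data (some (i : Int)) (some (j : Int))
          = (data.drop i).take (j - i) := PySem.List.slice_natCast data i j
      have htake : (data.drop i).take (j - i)
          = data[i]'h :: (data.drop (i + 1)).takeWhile nbP := by
        rw [hdrop]
        have hji : j - i = t + 1 := by omega
        rw [hji, List.take_succ_cons]
        congr 1
        rw [htdef]
        exact take_len_takeWhile nbP _
      rw [blocksLoopB_eq_spec data j, hslice, htake]
      have hdropj : data.drop j = (data.drop (i + 1)).dropWhile nbP := by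
        rw [dropWhile_eq_drop_len, ← htdef, List.drop_drop]
        congr 1
      rw [hdropj, hdrop, specBlocks_cons_pos _ _ hnb]
    · rw [if_neg hs]
      have hnb : nbP (data[i]'h) = false := by
        have hx : PySem.Str.strip (data[i]'h) = "" := by rw [← hget]; simpa using hs
        simp [nbP, hx]
      rw [blocksLoopB_eq_spec data (i + 1), hdrop, specBlocks_cons_neg _ _ hnb]
  · rw [dif_neg h]
    have hd : data.drop i = [] := List.drop_eq_nil_of_le (by omega)
    rw [hd, specBlocks]
termination_by data.length - i
decreasing_by
  · have := blocksScanB_ge data data.length (i + 1); omega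
  · omega

-- ===== VERDICT (by name: the statement is the Claim_ definition above) =====
theorem blocks_spec : Claim_equal_blocks := by
  intro file _
  show blocks file = blocks_alt file
  rw [blocks, goA_eq_spec, if_pos rfl, blocks_alt, blocksLoopB_eq_spec file 0, List.drop_zero]
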